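-- pv_equiv track=rewrite | github.com/gigagigohub/websoccer-player-search | scripts/reclassify_by_zero_lifecycle.py | collapse_start_raw
-- ===== SOURCE A (Python) =====
-- from typing import Dict, List, Optional
--
-- METRIC_KEYS = ['SPD', 'TEC', 'PWR']
--
-- def is_all_zero(param_row: Dict) -> bool:
--     return all(int(param_row.get(k, 0) or 0) == 0 for k in METRIC_KEYS)
--
-- def collapse_start_raw(params: List[Dict]) -> Optional[int]:
--     rows = sorted(params, key=lambda r: int(r.get('SZN_NO', 0) or 0))
--     zero_flags = [is_all_zero(r) for r in rows]
--     seasons = [int(r.get('SZN_NO', 0) or 0) for r in rows]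
--
--     for i, z in enumerate(zero_flags):
--         if not z:
--             continue
--         if all(zero_flags[i:]):
--             return seasons[i]
--     return None
-- ===== SOURCE B (Python) =====
-- from typing import Dict, List, Optional
--
-- METRIC_KEYS = ['SPD', 'TEC', 'PWR']
--
-- def collapse_start_raw(params: List[Dict]) -> Optional[int]:
--     # One forward pass over the season-sorted rows with a reset accumulator:
--     # cand holds the start of the current all-zero run; any non-zero row resets
--     # it, so at the end cand is the start of the trailing all-zero run.
--     def season(r):
--         return int(r.get('SZN_NO', 0) or 0)
--     cand = None
--     for r in sorted(params, key=season):
--         if int(r.get('SPD', 0) or 0) or int(r.get('TEC', 0) or 0) or int(r.get('PWR', 0) or 0):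
--             cand = None
--         elif cand is None:
--             cand = season(r)
--     return cand
-- ===== Notes on version B (the rewrite author's own statement) =====
-- stated objective: alternative
-- what changed: Replaces A's forward scan that re-checks all(zero_flags[i:]) at every zero row (quadratic rescans) with a single forward fold whose accumulator holds the start of the current all-zero run and is reset by any non-zero row.
import Mathlib
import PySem

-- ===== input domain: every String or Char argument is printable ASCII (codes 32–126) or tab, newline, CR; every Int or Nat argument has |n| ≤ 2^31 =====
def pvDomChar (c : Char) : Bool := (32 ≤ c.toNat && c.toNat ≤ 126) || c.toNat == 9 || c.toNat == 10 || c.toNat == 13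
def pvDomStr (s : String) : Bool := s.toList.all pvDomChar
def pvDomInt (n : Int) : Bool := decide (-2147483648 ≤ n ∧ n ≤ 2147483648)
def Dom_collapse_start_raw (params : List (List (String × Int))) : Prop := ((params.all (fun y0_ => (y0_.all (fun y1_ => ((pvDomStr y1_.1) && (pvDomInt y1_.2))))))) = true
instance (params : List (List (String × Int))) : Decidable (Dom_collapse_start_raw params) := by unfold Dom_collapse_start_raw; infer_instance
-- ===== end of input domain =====

-- B replaces A's per-row suffix rescans with a single forward fold whose accumulator is reset by any non-zero row (alternative, same measured cost).


-- ===== PORT A =====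
-- r.get(k, 0) with first-match dict semantics; 'int(x or 0)' is the identity on ints
def sznA (r : List (String × Int)) : Int := (PySem.Dict.mk r).getD "SZN_NO" 0

def isAllZeroA (r : List (String × Int)) : Bool :=
  ["SPD", "TEC", "PWR"].all (fun k => (PySem.Dict.mk r).getD k 0 == 0)

-- the 'for i, z in enumerate(zero_flags)' loop: continue on not z, else test all(zero_flags[i:])
def loopA : List Bool → List Int → Option Int
  | z :: zs, s :: _ss =>
      if z then
        (if (z :: zs).all (fun b => b) then some s else loopA zs _ss)
      else loopA zs _ss
  | _, _ => none

def collapse_start_raw (params : List (List (String × Int))) : Option Int :=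
  let rows := PySem.List.sorted params (fun r => sznA r) false
  let zero_flags := rows.map isAllZeroA
  let seasons := rows.map sznA
  loopA zero_flags seasons

-- ===== PORT B =====
-- loop body: a non-zero row resets the run; 'elif cand is None' starts a new run
def stepB (cand : Option Int) (r : List (String × Int)) : Option Int :=
  if ((PySem.Dict.mk r).getD "SPD" 0 != 0) || ((PySem.Dict.mk r).getD "TEC" 0 != 0)
      || ((PySem.Dict.mk r).getD "PWR" 0 != 0) then
    none
  else if cand.isNone then some ((PySem.Dict.mk r).getD "SZN_NO" 0)
  else cand

def collapse_start_raw_alt (params : List (List (String × Int))) : Option Int :=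
  (PySem.List.sorted params (fun r => (PySem.Dict.mk r).getD "SZN_NO" 0) false).foldl stepB none

-- ===== PRECONDITION & SPEC =====
def Spec_collapse_start_raw (params : List (List (String × Int))) (out : Option Int) : Prop := out = collapse_start_raw_alt params
instance (params : List (List (String × Int))) (out : Option Int) : Decidable (Spec_collapse_start_raw params out) := by unfold Spec_collapse_start_raw; infer_instance

-- ===== CLAIM (what is proved, stated in full; the proofs are below) =====
def Claim_equal_collapse_start_raw : Prop := ∀ (params : List (List (String × Int))), Dom_collapse_start_raw params → Spec_collapse_start_raw params (collapse_start_raw params)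

-- ===== LEMMAS AND PROOFS =====

theorem stepB_of_nonzero (r : List (String × Int)) (c : Option Int)
    (h : isAllZeroA r = false) : stepB c r = none := by
  simp only [isAllZeroA, List.all_cons, List.all_nil, Bool.and_true,
    Bool.and_eq_false_iff] at h
  simp only [stepB, bne]
  rcases h with h | h | h <;> simp [h]

theorem stepB_of_zero (r : List (String × Int)) (c : Option Int)
    (h : isAllZeroA r = true) :
    stepB c r = if c.isNone then some (sznA r) else c := by
  simp only [isAllZeroA, List.all_cons, List.all_nil, Bool.and_true,
    Bool.and_eq_true] at h
  simp [stepB, bne, h.1, h.2.1, h.2.2, sznA]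

theorem foldB_some (t : List (List (String × Int))) :
    ∀ s : Int, t.foldl stepB (some s) =
      if t.all isAllZeroA then some s else t.foldl stepB none := by
  induction t with
  | nil => intro s; simp
  | cons x xs ih =>
      intro s
      cases hx : isAllZeroA x with
      | false =>
          simp [List.foldl_cons, stepB_of_nonzero x _ hx, List.all_cons, hx]
      | true =>
          by_cases hall : xs.all isAllZeroA = true <;>
            simp [List.foldl_cons, stepB_of_zero x _ hx, ih, hall, List.all_cons, hx]

theorem loopA_eq_foldB (rows : List (List (String × Int))) :
    loopA (rows.map isAllZeroA) (rows.map sznA) = rows.foldl stepB none := by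
  induction rows with
  | nil => rfl
  | cons r t ih =>
      cases hz : isAllZeroA r with
      | false =>
          simp [List.map_cons, loopA, hz, ih, List.foldl_cons, stepB_of_nonzero r _ hz]
      | true =>
          have hmap : ((t.map isAllZeroA).all (fun b => b)) = t.all isAllZeroA := by
            simp [List.all_map, Function.comp_def]
          simp [List.map_cons, loopA, hz, hmap, List.all_cons, List.foldl_cons,
            stepB_of_zero r _ hz, foldB_some, ih]

-- ===== VERDICT (by name: the statement is the Claim_ definition above) =====
theorem collapse_start_raw_spec : Claim_equal_collapse_start_raw := by
  intro params _
  unfold Spec_collapse_start_raw collapse_start_raw collapse_start_raw_alt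
  have hkey : (fun r : List (String × Int) => sznA r)
      = (fun r : List (String × Int) => (PySem.Dict.mk r).getD "SZN_NO" 0) := rfl
  simpa [hkey] using loopA_eq_foldB (PySem.List.sorted params (fun r => sznA r) false)
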